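-- pv_equiv track=rewrite | github.com/Sergey-Golinskiy/3SD-SF-ScrewFeed | screwdrive/core/xy_table.py | _parse_limit_warnings
-- ===== SOURCE A (Python) =====
-- from typing import Optional, Tuple, Callable, Dict, Any
--
-- def _parse_limit_warnings(response: str) -> Optional[str]:
--     """
--     Parse limit warnings from response.
--
--     Warnings are in format: LIMIT_X_MAX:220.0 LIMIT_Y_MAX:500.0
--
--     Returns:
--         Warning message in Ukrainian or None if no warnings.
--     """
--     if not response:
--         return None
--
--     warnings = []
--     for part in response.split():
--         if part.startswith("LIMIT_X_MIN:"):
--             val = part.split(":")[1]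
--             warnings.append(f"X обмежено мін: {val} мм")
--         elif part.startswith("LIMIT_X_MAX:"):
--             val = part.split(":")[1]
--             warnings.append(f"X обмежено макс: {val} мм")
--         elif part.startswith("LIMIT_Y_MIN:"):
--             val = part.split(":")[1]
--             warnings.append(f"Y обмежено мін: {val} мм")
--         elif part.startswith("LIMIT_Y_MAX:"):
--             val = part.split(":")[1]
--             warnings.append(f"Y обмежено макс: {val} мм")
--
--     if warnings:
--         return "; ".join(warnings)
--     return None
-- ===== SOURCE B (Python) =====
-- from typing import Optional
--
-- _LABELS = (
--     ("LIMIT_X_MIN:", "X обмежено мін: "),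
--     ("LIMIT_X_MAX:", "X обмежено макс: "),
--     ("LIMIT_Y_MIN:", "Y обмежено мін: "),
--     ("LIMIT_Y_MAX:", "Y обмежено макс: "),
-- )
--
--
-- def _parse_limit_warnings(response: str) -> Optional[str]:
--     # Single character-level scan over the raw string: no split() and no
--     # per-token string objects; only the value slice of a matched token is
--     # ever materialised.
--     msgs = []
--     n = len(response)
--     i = 0
--     while i < n:
--         if response[i].isspace():
--             i += 1
--             continue
--         j = i
--         while j < n and not response[j].isspace():
--             j += 1
--         for prefix, label in _LABELS:
--             if response.startswith(prefix, i, j):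
--                 v = i + len(prefix)
--                 e = v
--                 while e < j and response[e] != ":":
--                     e += 1
--                 msgs.append(f"{label}{response[v:e]} мм")
--                 break
--         i = j
--     return "; ".join(msgs) if msgs else None
-- ===== Notes on version B (the rewrite author's own statement) =====
-- stated objective: alternative
-- what changed: Replaces A's split()-then-elif-prefix-chain over materialised tokens by a single character-level index scanner that walks the raw string once, finds token boundaries itself, matches a table of prefixes in place and slices out only the value up to the next colon or token end.
import Mathlib
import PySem

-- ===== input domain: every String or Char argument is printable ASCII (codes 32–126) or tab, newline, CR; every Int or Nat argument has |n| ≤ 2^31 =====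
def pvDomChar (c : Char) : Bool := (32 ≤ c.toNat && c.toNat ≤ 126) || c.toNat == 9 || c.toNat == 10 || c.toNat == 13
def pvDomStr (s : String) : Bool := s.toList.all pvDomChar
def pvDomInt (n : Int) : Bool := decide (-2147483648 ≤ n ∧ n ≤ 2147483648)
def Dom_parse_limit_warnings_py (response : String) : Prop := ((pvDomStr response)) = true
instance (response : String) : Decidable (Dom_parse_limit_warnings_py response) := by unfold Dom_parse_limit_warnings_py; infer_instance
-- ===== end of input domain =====

-- B replaces A's split()-then-elif-prefix-chain by a single character-level scanner that
-- finds token boundaries itself and slices out only the matched value (objective: alternative).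


-- ===== PORT A =====
-- one iteration of A's for-loop; part.split(":")[1] is written with getD: under each
-- startswith guard the token contains a ':', so the split has at least two pieces and
-- Python's [1] cannot raise (the getD default is never used).
def pvStepA (acc : List String) (part : String) : List String :=
  if PySem.Str.startswith part "LIMIT_X_MIN:" then
    acc ++ [PySem.Str.join "" ["X обмежено мін: ", ((PySem.Str.split? part ":").getD []).getD 1 "", " мм"]]
  else if PySem.Str.startswith part "LIMIT_X_MAX:" then
    acc ++ [PySem.Str.join "" ["X обмежено макс: ", ((PySem.Str.split? part ":").getD []).getD 1 "", " мм"]]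
  else if PySem.Str.startswith part "LIMIT_Y_MIN:" then
    acc ++ [PySem.Str.join "" ["Y обмежено мін: ", ((PySem.Str.split? part ":").getD []).getD 1 "", " мм"]]
  else if PySem.Str.startswith part "LIMIT_Y_MAX:" then
    acc ++ [PySem.Str.join "" ["Y обмежено макс: ", ((PySem.Str.split? part ":").getD []).getD 1 "", " мм"]]
  else acc

def parse_limit_warnings_py (response : String) : Option String :=
  if response = "" then none
  else
    let warnings := (PySem.Str.split₀ response).foldl pvStepA []
    if warnings ≠ [] then some (PySem.Str.join "; " warnings) else none

-- ===== PORT B =====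
-- B's _LABELS table (each label already carries the ": " of the f-string)
def pvLabels : List (String × String) :=
  [("LIMIT_X_MIN:", "X обмежено мін: "), ("LIMIT_X_MAX:", "X обмежено макс: "),
   ("LIMIT_Y_MIN:", "Y обмежено мін: "), ("LIMIT_Y_MAX:", "Y обмежено макс: ")]

-- B's inner for-loop over _LABELS: response.startswith(prefix, i, j) is exactly
-- 'prefix is a prefix of the token chars', and the inner while collecting the value
-- up to the next ':' or the token end is takeWhile (· ≠ ':') on the remainder.
def pvMatch (tok : List Char) : List (String × String) → Option String
  | [] => none
  | (p, label) :: rest =>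
    if p.toList.isPrefixOf tok then
      some (PySem.Str.join "" [label, String.ofList ((tok.drop p.toList.length).takeWhile (fun c => c ≠ ':')), " мм"])
    else pvMatch tok rest

-- B's outer while-loop: the index scan over the raw string becomes structural
-- recursion on the char list; the two index sub-loops (skip whitespace / find the
-- token end j) are the recursive space case and takeWhile/dropWhile.
def pvScanB : List Char → List String
  | [] => []
  | c :: cs =>
    if PySem.Chars.isspace c then pvScanB cs
    else
      (pvMatch ((c :: cs).takeWhile (fun d => !PySem.Chars.isspace d)) pvLabels).toList
        ++ pvScanB ((c :: cs).dropWhile (fun d => !PySem.Chars.isspace d))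
termination_by cs => cs.length
decreasing_by
  · simp
  · rw [List.dropWhile_cons]
    split
    · exact Nat.lt_succ_of_le (List.length_dropWhile_le _ _)
    · simp_all

def parse_limit_warnings_py_alt (response : String) : Option String :=
  let msgs := pvScanB response.toList
  if msgs ≠ [] then some (PySem.Str.join "; " msgs) else none

-- ===== PRECONDITION & SPEC =====
def Spec_parse_limit_warnings_py (response : String) (out : Option String) : Prop := out = parse_limit_warnings_py_alt response
instance (response : String) (out : Option String) : Decidable (Spec_parse_limit_warnings_py response out) := by unfold Spec_parse_limit_warnings_py; infer_instance

-- ===== CLAIM (what is proved, stated in full; the proofs are below) =====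
def Claim_equal_parse_limit_warnings_py : Prop := ∀ (response : String), Dom_parse_limit_warnings_py response → Spec_parse_limit_warnings_py response (parse_limit_warnings_py response)

-- ===== LEMMAS AND PROOFS =====

-- structural description of Python's s.split(":") on the char level
def pvSplits : List Char → List (List Char)
  | [] => [[]]
  | c :: rest =>
    if c = ':' then [] :: pvSplits rest
    else
      match pvSplits rest with
      | [] => [[c]]
      | p :: ps => (c :: p) :: ps

theorem pvSplits_ne_nil (cs : List Char) : pvSplits cs ≠ [] := by
  cases cs with
  | nil => simp [pvSplits]
  | cons c rest =>
    simp only [pvSplits]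
    split
    · simp
    · split <;> simp_all

theorem pv_go_eq : ∀ (fuel : Nat) (cs cur : List Char) (acc : List (List Char)) (p : List Char) (ps : List (List Char)),
    cs.length < fuel → pvSplits cs = p :: ps →
    PySem.Chars.splitOn.go [':'] fuel cs cur acc = acc.reverse ++ (cur.reverse ++ p) :: ps := by
  intro fuel
  induction fuel with
  | zero => intro cs _ _ _ _ h; omega
  | succ f ih =>
    intro cs cur acc p ps hlt hsp
    cases cs with
    | nil =>
      simp [pvSplits] at hsp
      simp [PySem.Chars.splitOn.go, hsp.1, hsp.2]
    | cons c rest =>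
      by_cases hc : c = ':'
      · subst hc
        simp only [pvSplits, if_true] at hsp
        obtain ⟨q, qs, hq⟩ : ∃ q qs, pvSplits rest = q :: qs := by
          rcases h : pvSplits rest with _ | ⟨q, qs⟩
          · exact absurd h (pvSplits_ne_nil rest)
          · exact ⟨q, qs, rfl⟩
        rw [hq] at hsp
        have := ih rest [] (cur.reverse :: acc) q qs (by simpa using hlt) hq
        have hgo : PySem.Chars.splitOn.go [':'] (f + 1) (':' :: rest) cur acc
            = PySem.Chars.splitOn.go [':'] f rest [] (cur.reverse :: acc) := by
          simp [PySem.Chars.splitOn.go, List.isPrefixOf]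
        rw [hgo, this]
        obtain ⟨hp, hps⟩ := List.cons.inj hsp
        subst hp hps
        simp
      · simp only [pvSplits, if_neg hc] at hsp
        obtain ⟨q, qs, hq⟩ : ∃ q qs, pvSplits rest = q :: qs := by
          rcases h : pvSplits rest with _ | ⟨q, qs⟩
          · exact absurd h (pvSplits_ne_nil rest)
          · exact ⟨q, qs, rfl⟩
        rw [hq] at hsp
        obtain ⟨hp, hps⟩ := List.cons.inj hsp
        subst hp hps
        have hpre : [':'].isPrefixOf (c :: rest) = false := by
          simp [List.isPrefixOf]
          exact fun h => absurd h.symm hc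
        simp only [PySem.Chars.splitOn.go, hpre]
        have := ih rest (c :: cur) acc q qs (by simpa using hlt) hq
        simp only [Bool.false_eq_true, if_false, this, List.reverse_cons, List.append_assoc,
          List.cons_append, List.nil_append]

theorem pv_splitOn_eq (cs : List Char) : PySem.Chars.splitOn cs [':'] = pvSplits cs := by
  obtain ⟨p, ps, hp⟩ : ∃ p ps, pvSplits cs = p :: ps := by
    rcases h : pvSplits cs with _ | ⟨p, ps⟩
    · exact absurd h (pvSplits_ne_nil cs)
    · exact ⟨p, ps, rfl⟩
  rw [PySem.Chars.splitOn, pv_go_eq (cs.length + 1) cs [] [] p ps (by omega) hp, hp]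
  simp

-- the first piece of s.split(":") is the run before the first colon
theorem pvSplits_head (cs : List Char) :
    ∃ qs, pvSplits cs = cs.takeWhile (fun c => c ≠ ':') :: qs := by
  induction cs with
  | nil => exact ⟨[], rfl⟩
  | cons c rest ih =>
    by_cases hc : c = ':'
    · subst hc; exact ⟨pvSplits rest, by simp [pvSplits]⟩
    · obtain ⟨qs, hq⟩ := ih
      exact ⟨qs, by simp [pvSplits, hc, hq]⟩

-- splitting at an explicit first colon
theorem pvSplits_append (K b : List Char) (hK : ':' ∉ K) :
    pvSplits (K ++ ':' :: b) = K :: pvSplits b := by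
  induction K with
  | nil => simp [pvSplits]
  | cons k K' ih =>
    have hk : k ≠ ':' := by simp at hK; exact fun h => hK.1 h.symm
    have hK' : ':' ∉ K' := fun h => hK (List.mem_cons_of_mem _ h)
    simp [pvSplits, hk, ih hK']

-- A's part.split(":")[1] for a token K ++ ':' ++ b with no colon in K
theorem pv_val (K b : List Char) (hK : ':' ∉ K) :
    ((PySem.Str.split? (String.ofList (K ++ ':' :: b)) ":").getD []).getD 1 ""
      = String.ofList (b.takeWhile (fun c => c ≠ ':')) := by
  rw [PySem.Str.split?]
  rw [show (":" : String).toList = [':'] from rfl]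
  rw [PySem.Chars.split?]
  simp only [String.toList_ofList]
  rw [pv_splitOn_eq, pvSplits_append K b hK]
  obtain ⟨qs, hq⟩ := pvSplits_head b
  simp [hq]

-- one true branch of the elif chain: rewrite the token as prefix ++ rest and the value
theorem pv_branch (tok b : List Char) (P : String) (K : List Char)
    (hP : P.toList = K ++ [':']) (hK : ':' ∉ K) (htok : P.toList ++ b = tok) :
    ((PySem.Str.split? (String.ofList tok) ":").getD []).getD 1 ""
      = String.ofList ((tok.drop P.toList.length).takeWhile (fun c => c ≠ ':')) := by
  subst htok
  rw [List.drop_left, hP, List.append_assoc, List.singleton_append, pv_val K b hK]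

-- the per-token step of A equals appending B's optional message for that token
theorem pv_step_eq (acc : List String) (tok : List Char) :
    pvStepA acc (String.ofList tok) = acc ++ (pvMatch tok pvLabels).toList := by
  have hstart : ∀ K : String, PySem.Str.startswith (String.ofList tok) K = K.toList.isPrefixOf tok := by
    intro K; simp [PySem.Str.startswith, PySem.Chars.startswith]
  unfold pvStepA
  simp only [hstart, pvLabels, pvMatch]
  by_cases h1 : ("LIMIT_X_MIN:" : String).toList.isPrefixOf tok
  · obtain ⟨b, hb⟩ := List.isPrefixOf_iff_prefix.mp h1
    simp only [h1, if_true,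
      pv_branch tok b "LIMIT_X_MIN:" ("LIMIT_X_MIN".toList) rfl (by decide) hb, Option.toList_some]
  · simp only [h1, Bool.false_eq_true, if_false]
    by_cases h2 : ("LIMIT_X_MAX:" : String).toList.isPrefixOf tok
    · obtain ⟨b, hb⟩ := List.isPrefixOf_iff_prefix.mp h2
      simp only [h2, if_true,
        pv_branch tok b "LIMIT_X_MAX:" ("LIMIT_X_MAX".toList) rfl (by decide) hb, Option.toList_some]
    · simp only [h2, Bool.false_eq_true, if_false]
      by_cases h3 : ("LIMIT_Y_MIN:" : String).toList.isPrefixOf tok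
      · obtain ⟨b, hb⟩ := List.isPrefixOf_iff_prefix.mp h3
        simp only [h3, if_true,
          pv_branch tok b "LIMIT_Y_MIN:" ("LIMIT_Y_MIN".toList) rfl (by decide) hb, Option.toList_some]
      · simp only [h3, Bool.false_eq_true, if_false]
        by_cases h4 : ("LIMIT_Y_MAX:" : String).toList.isPrefixOf tok
        · obtain ⟨b, hb⟩ := List.isPrefixOf_iff_prefix.mp h4
          simp only [h4, if_true,
            pv_branch tok b "LIMIT_Y_MAX:" ("LIMIT_Y_MAX".toList) rfl (by decide) hb, Option.toList_some]
        · simp only [h4, Bool.false_eq_true, if_false, Option.toList_none, List.append_nil]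

-- B's whitespace tokenisation, stated as a plain structural recursion
def pvSplitWs : List Char → List (List Char)
  | [] => []
  | c :: cs =>
    if PySem.Chars.isspace c then pvSplitWs cs
    else
      (c :: cs).takeWhile (fun d => !PySem.Chars.isspace d)
        :: pvSplitWs ((c :: cs).dropWhile (fun d => !PySem.Chars.isspace d))
termination_by cs => cs.length
decreasing_by
  · simp
  · rw [List.dropWhile_cons]
    split
    · exact Nat.lt_succ_of_le (List.length_dropWhile_le _ _)
    · simp_all

theorem pv_split₀_go_eq (cs : List Char) : ∀ (cur : List Char) (acc : List (List Char)),
    PySem.Chars.split₀.go cs cur acc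
      = acc.reverse ++ (if cur.isEmpty then pvSplitWs cs
          else (cur.reverse ++ cs.takeWhile (fun d => !PySem.Chars.isspace d))
            :: pvSplitWs (cs.dropWhile (fun d => !PySem.Chars.isspace d))) := by
  induction cs with
  | nil =>
    intro cur acc
    cases cur with
    | nil => simp [PySem.Chars.split₀.go, pvSplitWs]
    | cons x xs => simp [PySem.Chars.split₀.go, pvSplitWs]
  | cons c rest ih =>
    intro cur acc
    by_cases hsp : PySem.Chars.isspace c
    · cases cur with
      | nil =>
        rw [show PySem.Chars.split₀.go (c :: rest) [] acc = PySem.Chars.split₀.go rest [] acc by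
          simp [PySem.Chars.split₀.go, hsp]]
        rw [ih [] acc]
        simp [pvSplitWs, hsp]
      | cons x xs =>
        rw [show PySem.Chars.split₀.go (c :: rest) (x :: xs) acc
            = PySem.Chars.split₀.go rest [] ((x :: xs).reverse :: acc) by
          simp [PySem.Chars.split₀.go, hsp]]
        rw [ih [] ((x :: xs).reverse :: acc)]
        simp [pvSplitWs, hsp]
    · rw [show PySem.Chars.split₀.go (c :: rest) cur acc
          = PySem.Chars.split₀.go rest (c :: cur) acc by
        simp [PySem.Chars.split₀.go, hsp]]
      rw [ih (c :: cur) acc]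
      cases cur with
      | nil => simp [pvSplitWs, hsp, List.takeWhile_cons]
      | cons x xs => simp [pvSplitWs, hsp, List.takeWhile_cons]

theorem pv_split₀_eq (cs : List Char) : PySem.Chars.split₀ cs = pvSplitWs cs := by
  rw [PySem.Chars.split₀, pv_split₀_go_eq]
  simp

-- B's scanner produces exactly one optional message per whitespace token
theorem pv_scan_eq (cs : List Char) :
    pvScanB cs = (pvSplitWs cs).flatMap (fun tok => (pvMatch tok pvLabels).toList) := by
  induction cs using pvScanB.induct with
  | case1 => rw [pvScanB, pvSplitWs]; rfl
  | case2 c cs hsp ih => rw [pvScanB, pvSplitWs, if_pos hsp, if_pos hsp, ih]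
  | case3 c cs hsp ih =>
    rw [pvScanB, pvSplitWs, if_neg hsp, if_neg hsp, List.flatMap_cons, ih]

-- folding A's step over the tokens = concatenating B's per-token messages
theorem pv_fold_eq (l : List (List Char)) (acc : List String) :
    (l.map String.ofList).foldl pvStepA acc
      = acc ++ l.flatMap (fun tok => (pvMatch tok pvLabels).toList) := by
  induction l generalizing acc with
  | nil => simp
  | cons t ts ih => simp [List.foldl_cons, pv_step_eq, ih, List.flatMap_cons]

-- ===== VERDICT (by name: the statement is the Claim_ definition above) =====
theorem parse_limit_warnings_py_spec : Claim_equal_parse_limit_warnings_py := by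
  intro response _
  unfold Spec_parse_limit_warnings_py parse_limit_warnings_py parse_limit_warnings_py_alt
  have hmsgs : (PySem.Str.split₀ response).foldl pvStepA [] = pvScanB response.toList := by
    rw [PySem.Str.split₀, pv_split₀_eq, pv_fold_eq, pv_scan_eq]
    simp
  by_cases h : response = ""
  · subst h
    have h0 : pvScanB [] = [] := by rw [pvScanB]
    simp [h0]
  · simp only [h, if_false, hmsgs]
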